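-- pv_equiv track=rewrite | github.com/inveniosoftware/license-changer | change_license.py | del_license_for_rst_content
-- ===== SOURCE A (Python) =====
-- def del_license_for_rst_content(text, years=None, add_missing=False):
--     """Remove the license header from RST files."""
--     # detect license block end:
--     license_block_end = 'submit itself to any jurisdiction.'
--     if license_block_end in text:
--         pass  # good, we found it
--     else:
--         license_block_end = 'MA 02111-1307, USA.'
--         if license_block_end in text:
--             pass  # good, we found it
--         else:
--             return text, False  # License not found, return original text
--     # update the file until license block end:
--     license_block_p = True
--     main_content_p = False
--     new_output = []
--     for line in text.split('\n'):
--         line = line.rstrip()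
--         if license_block_p:
--             if license_block_end in line:
--                 license_block_p = False
--         else:
--             if main_content_p:
--                 new_output.append(line)
--             else:
--                 if len(line):
--                     main_content_p = True
--                     new_output.append(line)
--                 else:
--                     # ignore empty lines immediately after copyright
--                     pass
--     # TODO: We don't always modify, second parameter can be False
--     return '\n'.join(new_output), True
-- ===== SOURCE B (Python) =====
-- def del_license_for_rst_content(text, years=None, add_missing=False):
--     """Remove the license header from RST files."""
--     marker = 'submit itself to any jurisdiction.'
--     if marker not in text:
--         marker = 'MA 02111-1307, USA.'
--         if marker not in text:
--             return text, False  # License not found, return original text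
--     lines = [l.rstrip() for l in text.split('\n')]
--     idx = next((i for i, l in enumerate(lines) if marker in l), None)
--     if idx is None:
--         return '', True
--     tail = lines[idx + 1:]
--     start = next((j for j, l in enumerate(tail) if l), len(tail))
--     return '\n'.join(tail[start:]), True
-- ===== Notes on version B (the rewrite author's own statement) =====
-- stated objective: simpler
-- what changed: Replaces A's two-boolean state machine over all lines with a direct decomposition: find the index of the marker line, slice off everything up to it, and drop leading empty lines from the tail.
import Mathlib
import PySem

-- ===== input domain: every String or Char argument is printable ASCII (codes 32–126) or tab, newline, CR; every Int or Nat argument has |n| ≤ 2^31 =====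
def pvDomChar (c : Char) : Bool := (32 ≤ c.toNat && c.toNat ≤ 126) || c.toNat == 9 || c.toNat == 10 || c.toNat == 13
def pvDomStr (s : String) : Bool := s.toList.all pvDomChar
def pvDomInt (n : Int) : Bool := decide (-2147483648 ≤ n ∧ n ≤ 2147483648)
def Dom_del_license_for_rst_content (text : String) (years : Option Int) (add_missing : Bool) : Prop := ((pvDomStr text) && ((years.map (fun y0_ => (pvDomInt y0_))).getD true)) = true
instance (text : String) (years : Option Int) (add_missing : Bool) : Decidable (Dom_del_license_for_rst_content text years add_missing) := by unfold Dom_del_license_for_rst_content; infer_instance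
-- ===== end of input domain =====

-- B replaces A's two-flag state machine with find-marker-index, slice, drop leading empties (simpler decomposition, same cost).

-- ===== PORT A =====
-- A's loop body on an already-rstripped line: state = (license_block_p, main_content_p, new_output)
def aStepR (marker : String) (st : Bool × Bool × List String) (line : String) : Bool × Bool × List String :=
  if st.1 then
    if PySem.Str.isIn marker line then (false, st.2.1, st.2.2) else st
  else
    if st.2.1 then (st.1, st.2.1, st.2.2 ++ [line])
    else
      if PySem.Str.len line ≠ 0 then (st.1, true, st.2.2 ++ [line])
      else st

-- the loop + final join, once the marker has been fixed
def aGo (marker text : String) : String × Bool :=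
  let st := (((PySem.Str.split? text "\n").getD [])).foldl
    (fun st line => aStepR marker st (PySem.Str.rstrip line)) (true, false, ([] : List String))
  (PySem.Str.join "\n" st.2.2, true)

def del_license_for_rst_content (text : String) (years : Option Int) (add_missing : Bool) : String × Bool :=
  let m1 := "submit itself to any jurisdiction."
  if PySem.Str.isIn m1 text then aGo m1 text
  else
    let m2 := "MA 02111-1307, USA."
    if PySem.Str.isIn m2 text then aGo m2 text
    else (text, false)

-- ===== PORT B =====
def bCore (marker text : String) : String × Bool :=
  let lines := (((PySem.Str.split? text "\n").getD [])).map PySem.Str.rstrip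
  match lines.findIdx? (fun l => PySem.Str.isIn marker l) with
  | none => ("", true)
  | some i =>
    let tail := lines.drop (i + 1)
    let start := tail.findIdx (fun l => !(l == ""))   -- index of first truthy line, len(tail) if none
    (PySem.Str.join "\n" (tail.drop start), true)

def del_license_for_rst_content_alt (text : String) (years : Option Int) (add_missing : Bool) : String × Bool :=
  if PySem.Str.isIn "submit itself to any jurisdiction." text then
    bCore "submit itself to any jurisdiction." text
  else if PySem.Str.isIn "MA 02111-1307, USA." text then
    bCore "MA 02111-1307, USA." text
  else (text, false)

-- ===== PRECONDITION & SPEC =====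
def Spec_del_license_for_rst_content (text : String) (years : Option Int) (add_missing : Bool) (out : String × Bool) : Prop := out = del_license_for_rst_content_alt text years add_missing
instance (text : String) (years : Option Int) (add_missing : Bool) (out : String × Bool) : Decidable (Spec_del_license_for_rst_content text years add_missing out) := by unfold Spec_del_license_for_rst_content; infer_instance

-- ===== CLAIM (what is proved, stated in full; the proofs are below) =====
def Claim_equal_del_license_for_rst_content : Prop := ∀ (text : String) (years : Option Int) (add_missing : Bool), Dom_del_license_for_rst_content text years add_missing → Spec_del_license_for_rst_content text years add_missing (del_license_for_rst_content text years add_missing)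

-- ===== LEMMAS AND PROOFS =====

-- phase 3: main content, everything appended
theorem aStepR_main (m : String) (ls : List String) (acc : List String) :
    (ls.foldl (aStepR m) (false, true, acc)).2.2 = acc ++ ls := by
  induction ls generalizing acc with
  | nil => simp
  | cons l ls ih => simp [List.foldl_cons, aStepR, ih]

-- phase 2: skipping leading empty lines = drop to the first nonempty line
theorem aStepR_skip (m : String) (ls : List String) (acc : List String) :
    (ls.foldl (aStepR m) (false, false, acc)).2.2
      = acc ++ ls.drop (ls.findIdx (fun l => !(l == ""))) := by
  induction ls generalizing acc with
  | nil => simp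
  | cons l ls ih =>
    by_cases h : l = ""
    · subst h
      simp [List.foldl_cons, aStepR, PySem.Str.len, ih, List.findIdx_cons]
    · have hlen : PySem.Str.len l ≠ 0 := by
        simp [PySem.Str.len]
        intro hc
        exact h (by cases l; simp_all)
      have hb : (l == "") = false := by simpa using h
      simp [List.foldl_cons, aStepR, h, aStepR_main, List.findIdx_cons, hb]

-- phase 1: searching for the marker line
theorem aStepR_search (m : String) (ls : List String) (acc : List String) :
    (ls.foldl (aStepR m) (true, false, acc)).2.2
      = match ls.findIdx? (fun l => PySem.Str.isIn m l) with
        | none => acc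
        | some i => ((ls.drop (i + 1)).foldl (aStepR m) (false, false, acc)).2.2 := by
  induction ls generalizing acc with
  | nil => simp
  | cons l ls ih =>
    by_cases h : PySem.Str.isIn m l = true
    · rw [PySem.Str.isIn_eq] at h
      simp [List.foldl_cons, aStepR, h, List.findIdx?_cons]
    · have h' : PySem.Str.isIn m l = false := by simpa using h
      rw [PySem.Str.isIn_eq] at h'
      simp only [List.foldl_cons, aStepR, PySem.Str.isIn_eq, h', if_true, if_false,
        Bool.false_eq_true, List.findIdx?_cons]
      rw [ih]
      cases hf : ls.findIdx? (fun l => PySem.Str.isIn m l) <;>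
        simp only [PySem.Str.isIn_eq] at hf <;> simp [hf]

theorem aGo_eq_bCore (m text : String) : aGo m text = bCore m text := by
  unfold aGo bCore
  simp only [← List.foldl_map (f := PySem.Str.rstrip) (g := aStepR m), aStepR_search]
  cases hf : ((((PySem.Str.split? text "\n").getD [])).map PySem.Str.rstrip).findIdx?
      (fun l => PySem.Str.isIn m l) with
  | none => simp [hf, PySem.Str.join, PySem.Chars.join, List.intercalate]
  | some i => simp [hf, aStepR_skip]

-- ===== VERDICT (by name: the statement is the Claim_ definition above) =====
theorem del_license_for_rst_content_spec : Claim_equal_del_license_for_rst_content := by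
  intro text years add_missing _
  unfold Spec_del_license_for_rst_content del_license_for_rst_content del_license_for_rst_content_alt
  simp only [aGo_eq_bCore]
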